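-- pv_equiv track=rewrite | github.com/BPI-SINOVOIP/BPI-S905X3-Android9 | external/autotest/server/site_tests/enterprise_CFM_HuddlyUpdater/parse.py | parse_fw_vers
-- ===== SOURCE A (Python) =====
-- TOKEN_FW_CHUNK_HEADER = 'Firmware package:'
--
-- TOKEN_PERIPHERAL_CHUNK_HEADER = 'Camera Peripheral:'
--
-- TOKEN_BOOT = 'bootloader:'
--
-- TOKEN_APP = 'app:'
--
-- TOKEN_REV = 'hw_rev:'
--
-- def parse_fw_vers(chunk):
--     """Parse huddly-updater command output.
--
--     The parser logic heavily depends on the output format.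
--
--     @param chunk: The huddly-updater output. See CHUNK_FILENAME for example.
--
--     @returns a dictionary containing the version strings
--             for the firmware package and for the peripheral.
--     """
--     dic = {}
--     target = ''
--     for line in chunk.split('\n'):
--         if TOKEN_FW_CHUNK_HEADER in line:
--             target = 'package'
--             dic[target] = {}
--             continue
--         elif TOKEN_PERIPHERAL_CHUNK_HEADER in line:
--             target = 'peripheral'
--             dic[target] = {}
--             continue
--
--         if not target:
--             continue
--
--         fields = line.split(':')
--         if fields.__len__() < 2:
--             continue
--
--         val = fields[1].strip()
--
--         if TOKEN_BOOT in line: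
--             dic[target]['boot'] = val
--         elif TOKEN_APP in line:
--             dic[target]['app'] = val
--         elif TOKEN_REV in line:
--             dic[target]['hw_rev'] = val
--         else:
--             continue
--
--     return dic
-- ===== SOURCE B (Python) =====
-- TOKEN_FW_CHUNK_HEADER = 'Firmware package:'
-- TOKEN_PERIPHERAL_CHUNK_HEADER = 'Camera Peripheral:'
-- TOKEN_BOOT = 'bootloader:'
-- TOKEN_APP = 'app:'
-- TOKEN_REV = 'hw_rev:'
--
-- _HEADERS = ((TOKEN_FW_CHUNK_HEADER, 'package'),
--             (TOKEN_PERIPHERAL_CHUNK_HEADER, 'peripheral'))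
-- _TOKENS = ((TOKEN_BOOT, 'boot'), (TOKEN_APP, 'app'), (TOKEN_REV, 'hw_rev'))
--
--
-- def _parse_section(lines):
--     """Build one section's version dict from its collected lines."""
--     d = {}
--     for line in lines:
--         fields = line.split(':')
--         if len(fields) < 2:
--             continue
--         val = fields[1].strip()
--         for tok, key in _TOKENS:
--             if tok in line:
--                 d[key] = val
--                 break
--     return d
--
--
-- def parse_fw_vers(chunk):
--     """Two-pass variant: segment the output into labeled sections, then
--     parse each section's lines into its version dict."""
--     sections = {}
--     current = None
--     for line in chunk.split('\n'):
--         label = next((lab for tok, lab in _HEADERS if tok in line), None)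
--         if label is not None:
--             sections[label] = []
--             current = label
--         elif current is not None:
--             sections[current].append(line)
--     return {label: _parse_section(lines) for label, lines in sections.items()}
-- ===== Notes on version B (the rewrite author's own statement) =====
-- stated objective: alternative
-- what changed: B replaces A's single stateful scan that mutates nested dicts per line with a two-pass decomposition: first segment the output into labeled line-lists (header table + first-match lookup, duplicate headers reset a section), then parse each section's lines into its version dict via a token table instead of an if/elif chain.
import Mathlib
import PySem

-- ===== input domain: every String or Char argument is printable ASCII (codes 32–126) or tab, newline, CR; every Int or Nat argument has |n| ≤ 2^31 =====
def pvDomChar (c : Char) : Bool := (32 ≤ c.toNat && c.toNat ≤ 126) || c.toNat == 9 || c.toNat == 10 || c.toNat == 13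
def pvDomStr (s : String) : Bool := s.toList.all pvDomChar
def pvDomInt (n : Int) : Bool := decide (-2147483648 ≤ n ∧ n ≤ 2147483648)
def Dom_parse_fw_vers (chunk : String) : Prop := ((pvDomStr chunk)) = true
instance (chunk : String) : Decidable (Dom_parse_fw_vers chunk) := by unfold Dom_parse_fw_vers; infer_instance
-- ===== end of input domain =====

-- B is an alternative decomposition of A (same cost): segment-into-sections first, then parse each
-- section's lines with a token table; proved to return exactly A's value on every input.

-- ===== PORT A =====
-- one fold step of A's single loop over the lines (state: dict-of-dicts, current target; '' = no target)
def parseA_step (s : PySem.Dict String (PySem.Dict String String) × String) (line : String) :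
    PySem.Dict String (PySem.Dict String String) × String :=
  if PySem.Str.isIn "Firmware package:" line then
    (s.1.insert "package" PySem.Dict.empty, "package")
  else if PySem.Str.isIn "Camera Peripheral:" line then
    (s.1.insert "peripheral" PySem.Dict.empty, "peripheral")
  else if s.2 = "" then s
  else
    let fields := (PySem.Str.split? line ":").getD []
    if fields.length < 2 then s
    else
      let val := PySem.Str.strip (PySem.List.pyGetD fields 1 "")
      if PySem.Str.isIn "bootloader:" line then
        (s.1.modify s.2 PySem.Dict.empty (fun d => d.insert "boot" val), s.2)
      else if PySem.Str.isIn "app:" line then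
        (s.1.modify s.2 PySem.Dict.empty (fun d => d.insert "app" val), s.2)
      else if PySem.Str.isIn "hw_rev:" line then
        (s.1.modify s.2 PySem.Dict.empty (fun d => d.insert "hw_rev" val), s.2)
      else s

def parse_fw_vers (chunk : String) : List (String × List (String × String)) :=
  let st := ((PySem.Str.split? chunk "\n").getD []).foldl parseA_step (PySem.Dict.empty, "")
  st.1.items.map (fun p => (p.1, p.2.items))

-- ===== PORT B =====
def pvHeaders : List (String × String) :=
  [("Firmware package:", "package"), ("Camera Peripheral:", "peripheral")]

def pvTokens : List (String × String) :=
  [("bootloader:", "boot"), ("app:", "app"), ("hw_rev:", "hw_rev")]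

-- _parse_section's loop body: classify one line by the first matching token
def pvSectionStep (d : PySem.Dict String String) (line : String) : PySem.Dict String String :=
  let fields := (PySem.Str.split? line ":").getD []
  if fields.length < 2 then d
  else
    let val := PySem.Str.strip (PySem.List.pyGetD fields 1 "")
    match pvTokens.find? (fun p => PySem.Str.isIn p.1 line) with
    | some p => d.insert p.2 val
    | none => d

def pvParseSection (lines : List String) : PySem.Dict String String :=
  lines.foldl pvSectionStep PySem.Dict.empty

-- pass 1's loop body: route a line into the labeled sections (state: sections, current label)
def pvSegStep (s : PySem.Dict String (List String) × Option String) (line : String) :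
    PySem.Dict String (List String) × Option String :=
  match pvHeaders.find? (fun p => PySem.Str.isIn p.1 line) with
  | some p => (s.1.insert p.2 [], some p.2)
  | none =>
    match s.2 with
    | some c => (s.1.modify c [] (fun ls => ls ++ [line]), s.2)
    | none => s

def parse_fw_vers_alt (chunk : String) : List (String × List (String × String)) :=
  let st := ((PySem.Str.split? chunk "\n").getD []).foldl pvSegStep (PySem.Dict.empty, none)
  st.1.items.map (fun p => (p.1, (pvParseSection p.2).items))

-- ===== PRECONDITION & SPEC =====
def Spec_parse_fw_vers (chunk : String) (out : List (String × List (String × String))) : Prop := out = parse_fw_vers_alt chunk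
instance (chunk : String) (out : List (String × List (String × String))) : Decidable (Spec_parse_fw_vers chunk out) := by unfold Spec_parse_fw_vers; infer_instance

-- ===== CLAIM (what is proved, stated in full; the proofs are below) =====
def Claim_equal_parse_fw_vers : Prop := ∀ (chunk : String), Dom_parse_fw_vers chunk → Spec_parse_fw_vers chunk (parse_fw_vers chunk)

-- ===== LEMMAS AND PROOFS =====

-- map pvParseSection over the values of a sections dict: A's state is exactly this image of B's state
def pvMapVals (d : PySem.Dict String (List String)) : PySem.Dict String (PySem.Dict String String) :=
  ⟨d.items.map (fun p => (p.1, pvParseSection p.2))⟩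

def pvOfOpt : Option String → String
  | none => ""
  | some c => c

-- the invariant B's segmentation state maintains
def pvInv (s : PySem.Dict String (List String) × Option String) : Prop :=
  s.1.keys.Nodup ∧ s.2 ≠ some "" ∧ ∀ c, s.2 = some c → s.1.contains c = true

theorem pv_contains_mapVals (d : PySem.Dict String (List String)) (k : String) :
    (pvMapVals d).contains k = d.contains k := by
  simp only [pvMapVals, PySem.Dict.contains, List.any_map]
  rfl

theorem pv_keys_mapVals (d : PySem.Dict String (List String)) :
    (pvMapVals d).keys = d.keys := by
  simp only [pvMapVals, PySem.Dict.keys, List.map_map]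
  rfl

theorem pv_get?_mapVals (d : PySem.Dict String (List String)) (k : String) :
    (pvMapVals d).get? k = (d.get? k).map pvParseSection := by
  have hc : ((fun p : String × PySem.Dict String String => p.1 == k) ∘
      (fun p : String × List String => (p.1, pvParseSection p.2))) = (fun p => p.1 == k) := rfl
  simp only [pvMapVals, PySem.Dict.get?, List.find?_map, hc]
  cases List.find? (fun p => p.1 == k) d.items <;> rfl

theorem pv_getD_mapVals (d : PySem.Dict String (List String)) (k : String) :
    (pvMapVals d).getD k PySem.Dict.empty = pvParseSection (d.getD k []) := by
  simp only [PySem.Dict.getD, pv_get?_mapVals]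
  cases d.get? k <;> rfl

theorem pv_mapVals_insert (d : PySem.Dict String (List String)) (k : String) (v : List String) :
    pvMapVals (d.insert k v) = (pvMapVals d).insert k (pvParseSection v) := by
  simp only [PySem.Dict.insert, pv_contains_mapVals]
  split
  · simp only [pvMapVals, List.map_map]
    congr 1
    apply List.map_congr_left
    intro p _
    by_cases h : (p.1 == k) = true
    · simp only [Function.comp, h, if_true]
    · simp only [Function.comp, h, if_false, Bool.false_eq_true]
  · simp [pvMapVals]

theorem pv_find?_key_of_nodup {ν : Type} (l : List (String × ν)) (k : String) (p : String × ν)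
    (hn : (l.map Prod.fst).Nodup) (hp : p ∈ l) (hk : p.1 = k) :
    l.find? (fun q => q.1 == k) = some p := by
  induction l with
  | nil => cases hp
  | cons q l ih =>
    rw [List.map_cons, List.nodup_cons] at hn
    rcases List.mem_cons.mp hp with heq | hmem
    · subst heq
      exact List.find?_cons_of_pos (p := fun q => q.1 == k) (l := l) (by simpa using hk)
    · have hq : ¬ ((fun q : String × ν => q.1 == k) q = true) := by
        simp only [beq_iff_eq]
        intro hqk
        exact hn.1 (hqk ▸ hk ▸ List.mem_map.mpr ⟨p, hmem, rfl⟩)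
      rw [List.find?_cons_of_neg (p := fun q => q.1 == k) (l := l) hq]
      exact ih hn.2 hmem

theorem pv_insert_getD_self {ν : Type} (d : PySem.Dict String ν) (k : String) (dflt : ν)
    (hn : d.keys.Nodup) (hc : d.contains k = true) : d.insert k (d.getD k dflt) = d := by
  obtain ⟨q, hq, hqk⟩ : ∃ q ∈ d.items, (q.1 == k) = true := by
    simpa only [PySem.Dict.contains, List.any_eq_true] using hc
  have hqk' : q.1 = k := by simpa using hqk
  have hfind : d.items.find? (fun r => r.1 == k) = some q :=
    pv_find?_key_of_nodup d.items k q hn hq hqk'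
  have hgetD : d.getD k dflt = q.2 := by
    simp only [PySem.Dict.getD, PySem.Dict.get?, hfind, Option.map_some, Option.getD_some]
  simp only [PySem.Dict.insert, hc, if_true]
  cases d with
  | mk items =>
    congr 1
    conv_rhs => rw [← List.map_id items]
    apply List.map_congr_left
    intro r hr
    by_cases h : (r.1 == k) = true
    · have h2 := pv_find?_key_of_nodup items k r hn hr (by simpa using h)
      rw [hfind] at h2
      have hrq : q = r := Option.some.inj h2
      subst hrq
      simp only [h, if_true, hgetD, id_eq]
      rw [← hqk']
    · simp only [h, if_false, Bool.false_eq_true, id_eq]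

theorem pv_contains_modify (d : PySem.Dict String (List String)) (k k' : String)
    (f : List String → List String) :
    (d.modify k [] f).contains k' = (k' == k || d.contains k') := by
  simp only [PySem.Dict.modify, PySem.Dict.contains_insert]

theorem pv_parseSection_append (ls : List String) (line : String) :
    pvParseSection (ls ++ [line]) = pvSectionStep (pvParseSection ls) line := by
  simp only [pvParseSection, List.foldl_append, List.foldl_cons, List.foldl_nil]

-- one step of A's loop is the pvMapVals/pvOfOpt image of one step of B's segmentation pass
theorem pv_step_comm (s : PySem.Dict String (List String) × Option String) (line : String)
    (h : pvInv s) :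
    parseA_step (pvMapVals s.1, pvOfOpt s.2) line
        = (pvMapVals (pvSegStep s line).1, pvOfOpt (pvSegStep s line).2)
      ∧ pvInv (pvSegStep s line) := by
  obtain ⟨hn, hne, hcon⟩ := h
  cases h1 : PySem.Str.isIn "Firmware package:" line with
  | true =>
    have hh : pvHeaders.find? (fun p => PySem.Str.isIn p.1 line)
        = some ("Firmware package:", "package") := by
      rw [pvHeaders, List.find?_cons_of_pos (l := [("Camera Peripheral:", "peripheral")]) (by exact h1)]
    have hseg : pvSegStep s line = (s.1.insert "package" [], some "package") := by
      rw [pvSegStep, hh]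
    rw [hseg]
    refine ⟨?_, PySem.Dict.nodup_keys_insert _ _ _ hn, by simp, ?_⟩
    · simp only [parseA_step]
      rw [if_pos (by exact h1)]
      rw [pv_mapVals_insert]
      rfl
    · intro c hc
      cases hc
      exact PySem.Dict.contains_insert_self _ _ _
  | false =>
  cases h2 : PySem.Str.isIn "Camera Peripheral:" line with
  | true =>
    have hh : pvHeaders.find? (fun p => PySem.Str.isIn p.1 line)
        = some ("Camera Peripheral:", "peripheral") := by
      rw [pvHeaders, List.find?_cons_of_neg (by exact ne_true_of_eq_false h1),
        List.find?_cons_of_pos (l := ([] : List (String × String))) (by exact h2)]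
    have hseg : pvSegStep s line = (s.1.insert "peripheral" [], some "peripheral") := by
      rw [pvSegStep, hh]
    rw [hseg]
    refine ⟨?_, PySem.Dict.nodup_keys_insert _ _ _ hn, by simp, ?_⟩
    · simp only [parseA_step]
      rw [if_neg (by exact ne_true_of_eq_false h1), if_pos (by exact h2)]
      rw [pv_mapVals_insert]
      rfl
    · intro c hc
      cases hc
      exact PySem.Dict.contains_insert_self _ _ _
  | false =>
  have hh : pvHeaders.find? (fun p => PySem.Str.isIn p.1 line) = none := by
    rw [pvHeaders, List.find?_cons_of_neg (by exact ne_true_of_eq_false h1),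
      List.find?_cons_of_neg (by exact ne_true_of_eq_false h2), List.find?_nil]
  cases hs : s.2 with
  | none =>
    have hseg : pvSegStep s line = s := by
      rw [pvSegStep, hh, hs]
    rw [hseg]
    refine ⟨?_, hn, hne, hcon⟩
    rw [hs]
    simp only [parseA_step]
    rw [if_neg (by exact ne_true_of_eq_false h1), if_neg (by exact ne_true_of_eq_false h2)]
    rw [if_pos (show pvOfOpt none = "" from rfl)]
  | some c =>
    have hc0 : c ≠ "" := fun hce => hne (by rw [hs, hce])
    have hcc : s.1.contains c = true := hcon c hs
    have hseg : pvSegStep s line = (s.1.modify c [] (fun ls => ls ++ [line]), some c) := by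
      rw [pvSegStep, hh, hs]
    rw [hseg]
    have hmod : pvMapVals (s.1.modify c [] (fun ls => ls ++ [line]))
        = (pvMapVals s.1).insert c (pvSectionStep (pvParseSection (s.1.getD c [])) line) := by
      rw [PySem.Dict.modify, pv_mapVals_insert, pv_parseSection_append]
    have hget : (pvMapVals s.1).getD c PySem.Dict.empty = pvParseSection (s.1.getD c []) :=
      pv_getD_mapVals s.1 c
    have hself : pvSectionStep (pvParseSection (s.1.getD c [])) line
          = pvParseSection (s.1.getD c []) →
        pvMapVals (s.1.modify c [] (fun ls => ls ++ [line])) = pvMapVals s.1 := by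
      intro hEq
      rw [hmod, hEq, ← hget]
      exact pv_insert_getD_self _ _ _ (by rw [pv_keys_mapVals]; exact hn)
        (by rw [pv_contains_mapVals]; exact hcc)
    have hInv' : pvInv (s.1.modify c [] (fun ls => ls ++ [line]), some c) := by
      refine ⟨?_, by simpa using hc0.symm ∘ Eq.symm ∘ Option.some.inj, ?_⟩
      · rw [PySem.Dict.modify]
        exact PySem.Dict.nodup_keys_insert _ _ _ hn
      · intro c' hc'
        cases hc'
        rw [pv_contains_modify]
        simp
    refine ⟨?_, hInv'⟩
    simp only [parseA_step, pvOfOpt]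
    rw [if_neg (by exact ne_true_of_eq_false h1), if_neg (by exact ne_true_of_eq_false h2)]
    rw [if_neg hc0]
    by_cases hlen : ((PySem.Str.split? line ":").getD []).length < 2
    · rw [if_pos hlen]
      have hEq : pvSectionStep (pvParseSection (s.1.getD c [])) line
          = pvParseSection (s.1.getD c []) := by
        rw [pvSectionStep]
        simp only [hlen, if_true]
      rw [hself hEq]
    · rw [if_neg hlen]
      have hstep : ∀ tk : Option (String × String),
          pvTokens.find? (fun p => PySem.Str.isIn p.1 line) = tk →
          pvSectionStep (pvParseSection (s.1.getD c [])) line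
            = (match tk with
               | some p => (pvParseSection (s.1.getD c [])).insert p.2
                   (PySem.Str.strip (PySem.List.pyGetD ((PySem.Str.split? line ":").getD []) 1 ""))
               | none => pvParseSection (s.1.getD c [])) := by
        intro tk htk
        rw [pvSectionStep]
        simp only [hlen, if_false, htk]
      cases hb : PySem.Str.isIn "bootloader:" line with
      | true =>
        rw [if_pos (Eq.refl (true : Bool)), hmod, PySem.Dict.modify, hget]
        rw [hstep (some ("bootloader:", "boot"))
          (by rw [pvTokens, List.find?_cons_of_pos (l := [("app:", "app"), ("hw_rev:", "hw_rev")]) (by exact hb)])]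
      | false =>
      cases ha : PySem.Str.isIn "app:" line with
      | true =>
        rw [if_neg (by exact Bool.false_ne_true), if_pos (Eq.refl (true : Bool)), hmod,
          PySem.Dict.modify, hget]
        rw [hstep (some ("app:", "app"))
          (by rw [pvTokens, List.find?_cons_of_neg (by exact ne_true_of_eq_false hb),
            List.find?_cons_of_pos (l := [("hw_rev:", "hw_rev")]) (by exact ha)])]
      | false =>
      cases hr : PySem.Str.isIn "hw_rev:" line with
      | true =>
        rw [if_neg (by exact Bool.false_ne_true), if_neg (by exact Bool.false_ne_true),
          if_pos (Eq.refl (true : Bool)), hmod, PySem.Dict.modify, hget]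
        rw [hstep (some ("hw_rev:", "hw_rev"))
          (by rw [pvTokens, List.find?_cons_of_neg (by exact ne_true_of_eq_false hb),
            List.find?_cons_of_neg (by exact ne_true_of_eq_false ha),
            List.find?_cons_of_pos (l := ([] : List (String × String))) (by exact hr)])]
      | false =>
        rw [if_neg (by exact Bool.false_ne_true), if_neg (by exact Bool.false_ne_true),
          if_neg (by exact Bool.false_ne_true)]
        rw [hself (hstep none
          (by rw [pvTokens, List.find?_cons_of_neg (by exact ne_true_of_eq_false hb),
            List.find?_cons_of_neg (by exact ne_true_of_eq_false ha),
            List.find?_cons_of_neg (by exact ne_true_of_eq_false hr), List.find?_nil]))]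

theorem pv_fold_comm (lines : List String) (s : PySem.Dict String (List String) × Option String)
    (h : pvInv s) :
    lines.foldl parseA_step (pvMapVals s.1, pvOfOpt s.2)
      = (pvMapVals (lines.foldl pvSegStep s).1, pvOfOpt (lines.foldl pvSegStep s).2) := by
  induction lines generalizing s with
  | nil => rfl
  | cons line rest ih =>
    obtain ⟨heq, hinv⟩ := pv_step_comm s line h
    rw [List.foldl_cons, List.foldl_cons, heq]
    exact ih _ hinv

-- ===== VERDICT (by name: the statement is the Claim_ definition above) =====
theorem parse_fw_vers_spec : Claim_equal_parse_fw_vers := by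
  intro chunk _
  show parse_fw_vers chunk = parse_fw_vers_alt chunk
  unfold parse_fw_vers parse_fw_vers_alt
  have h0 : pvInv (PySem.Dict.empty, none) :=
    ⟨by simp [PySem.Dict.keys, PySem.Dict.empty], by simp, by simp⟩
  have hfold := pv_fold_comm ((PySem.Str.split? chunk "\n").getD []) (PySem.Dict.empty, none) h0
  have hinit : ((pvMapVals PySem.Dict.empty, pvOfOpt none) :
      PySem.Dict String (PySem.Dict String String) × String)
      = (PySem.Dict.empty, "") := rfl
  rw [hinit] at hfold
  rw [hfold]
  simp only [pvMapVals, List.map_map]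
  rfl
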